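-- pv_equiv track=rewrite | github.com/shfitzy/AdventOfCode | 2023/Day13/solution.py | check_symmetry
-- ===== SOURCE A (Python) =====
-- def check_symmetry(arrays):
--     for i in range(1, len(arrays)):
--         first = list(reversed(arrays[:i]))
--         second = arrays[i:]
--
--         for j in range(min(len(first), len(second))):
--             if not first[j] == second[j]:
--                 break
--             if j == min(len(first), len(second)) - 1:
--                 return len(first)
--
--     return 0
-- ===== SOURCE B (Python) =====
-- def check_symmetry(arrays):
--     # Intern rows as small int ids, run Manacher's algorithm (even centers) on
--     # the id sequence to get the maximal mirror radius at every boundary in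
--     # O(n) comparisons, then return the first boundary whose radius reaches an
--     # edge (a full mirror), or 0.
--     ids = {}
--     seq = []
--     for row in arrays:
--         if row not in ids:
--             ids[row] = len(ids)
--         seq.append(ids[row])
--     n = len(seq)
--     rad = [0] * (n + 1)
--     center = 0
--     right = 0
--     for i in range(1, n):
--         k = 0
--         if i < right:
--             k = min(rad[2 * center - i], right - i)
--         while k < i and i + k < n and seq[i - k - 1] == seq[i + k]:
--             k += 1
--         rad[i] = k
--         if i + k > right:
--             center = i
--             right = i + k
--     for i in range(1, n):
--         if rad[i] >= min(i, n - i):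
--             return i
--     return 0
-- ===== Notes on version B (the rewrite author's own statement) =====
-- stated objective: faster
-- what changed: B interns rows as int ids in one pass, then runs Manacher's even-center palindrome algorithm on the id sequence to compute every mirror radius in O(n) comparisons (instead of A's per-boundary rebuild-reverse-and-compare scans), and returns the first boundary whose radius reaches an edge.
import Mathlib
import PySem

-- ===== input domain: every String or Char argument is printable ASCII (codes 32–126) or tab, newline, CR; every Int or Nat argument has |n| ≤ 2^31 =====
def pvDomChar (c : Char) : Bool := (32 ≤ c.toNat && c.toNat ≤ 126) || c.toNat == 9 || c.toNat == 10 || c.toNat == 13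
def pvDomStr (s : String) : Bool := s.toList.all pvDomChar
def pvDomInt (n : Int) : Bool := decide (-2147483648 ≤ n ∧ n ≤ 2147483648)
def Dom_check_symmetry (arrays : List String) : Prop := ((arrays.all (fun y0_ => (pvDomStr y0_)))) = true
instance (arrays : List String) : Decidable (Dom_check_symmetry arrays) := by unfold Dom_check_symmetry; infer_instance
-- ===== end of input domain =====

-- B interns rows as int ids and runs Manacher's even-center algorithm on the id
-- sequence to compute all mirror radii, instead of A's per-boundary reversed-prefix
-- comparisons; the first radius reaching an edge is the answer.

-- ===== PORT A =====
-- inner loop: for j in range(min(len(first), len(second))): break / return len(first)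
def csInnerA (first second : List String) (j : Nat) : Option Int :=
  if _h : j < min first.length second.length then
    if ¬ (first.getD j "" = second.getD j "") then none        -- first[j], second[j]: j in range here
    else if j = min first.length second.length - 1 then some (first.length : Int)
    else csInnerA first second (j + 1)
  else none
termination_by min first.length second.length - j

-- outer loop: for i in range(1, len(arrays))
def csOuterA (arrays : List String) (i : Nat) : Int :=
  if _h : i < arrays.length then
    let first := (arrays.take i).reverse                       -- list(reversed(arrays[:i])), i ≥ 0: slice = take (exact)
    let second := arrays.drop i                                -- arrays[i:], i ≥ 0: slice = drop (exact)
    match csInnerA first second 0 with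
    | some r => r
    | none => csOuterA arrays (i + 1)
  else 0
termination_by arrays.length - i

def check_symmetry (arrays : List String) : Int := csOuterA arrays 1

-- ===== PORT B =====
-- for row in arrays: if row not in ids: ids[row] = len(ids); seq.append(ids[row])
def csIds (arrays : List String) : PySem.Dict String Int × List Int :=
  arrays.foldl
    (fun st row =>
      let d := if st.1.contains row then st.1 else st.1.insert row (st.1.size : Int)
      (d, st.2 ++ [d.getD row 0]))
    (PySem.Dict.empty, [])

-- while k < i and i + k < n and seq[i-k-1] == seq[i+k]: k += 1
def csExpand (seq : List Int) (i k : Nat) : Nat :=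
  if h : k < i ∧ i + k < seq.length ∧ seq.getD (i - k - 1) 0 = seq.getD (i + k) 0 then
    csExpand seq i (k + 1)
  else k
termination_by i - k
decreasing_by omega

-- for i in range(1, n): … rad[i] = k …  (rad is filled left to right, so the
-- in-place write rad[i] = k is ported as appending the i-th entry; rad[j] is
-- only ever read at mirror indices j < i)
def csManacher (seq : List Int) (i : Nat) (rad : List Nat) (center right : Nat) : List Nat :=
  if _h : i < seq.length then
    let k0 := if i < right then min (rad.getD (2 * center - i) 0) (right - i) else 0
    let k := csExpand seq i k0
    if i + k > right then csManacher seq (i + 1) (rad ++ [k]) i (i + k)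
    else csManacher seq (i + 1) (rad ++ [k]) center right
  else rad
termination_by seq.length - i

-- for i in range(1, n): if rad[i] >= min(i, n - i): return i
def csScan (rad : List Nat) (n i : Nat) : Int :=
  if _h : i < n then
    if min i (n - i) ≤ rad.getD i 0 then (i : Int) else csScan rad n (i + 1)
  else 0
termination_by n - i

def check_symmetry_alt (arrays : List String) : Int :=
  let seq := (csIds arrays).2
  csScan (csManacher seq 1 [0] 0 0) seq.length 1

-- ===== PRECONDITION & SPEC =====
def Spec_check_symmetry (arrays : List String) (out : Int) : Prop := out = check_symmetry_alt arrays
instance (arrays : List String) (out : Int) : Decidable (Spec_check_symmetry arrays out) := by unfold Spec_check_symmetry; infer_instance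

-- ===== CLAIM (what is proved, stated in full; the proofs are below) =====
def Claim_equal_check_symmetry : Prop := ∀ (arrays : List String), Dom_check_symmetry arrays → Spec_check_symmetry arrays (check_symmetry arrays)

-- ===== LEMMAS AND PROOFS =====

-- A's inner loop succeeds (returning len(first)) iff all compared positions agree.
theorem csInnerA_eq (first second : List String) :
    ∀ (fuel j : Nat), min first.length second.length - j ≤ fuel →
    j < min first.length second.length →
    csInnerA first second j =
      if ∀ l, j ≤ l → l < min first.length second.length → first.getD l "" = second.getD l "" then
        some (first.length : Int) else none := by
  intro fuel
  induction fuel with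
  | zero => intro j hf hj; omega
  | succ f ih =>
      intro j hf hj
      rw [csInnerA, dif_pos hj]
      by_cases heq : first.getD j "" = second.getD j ""
      · rw [if_neg (not_not_intro heq)]
        by_cases hlast : j = min first.length second.length - 1
        · rw [if_pos hlast, if_pos]
          intro l hl1 hl2
          have hl : l = j := by omega
          exact hl ▸ heq
        · rw [if_neg hlast, ih (j+1) (by omega) (by omega)]
          by_cases hall : ∀ l, j+1 ≤ l → l < min first.length second.length → first.getD l "" = second.getD l ""
          · rw [if_pos hall, if_pos]
            intro l hl1 hl2
            rcases Nat.eq_or_lt_of_le hl1 with h | h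
            · exact h ▸ heq
            · exact hall l h hl2
          · rw [if_neg hall, if_neg]
            intro hc; exact hall fun l hl1 hl2 => hc l (by omega) hl2
      · rw [if_pos heq, if_neg]
        intro hc; exact heq (hc j le_rfl hj)

-- the compared positions of (reversed prefix, suffix) are arrays[i-1-j] and arrays[i+j]
theorem mirror_cond (arrays : List String) (i : Nat) (hi1 : 1 ≤ i) (hin : i < arrays.length)
    (k : Nat) (hk : k = min i (arrays.length - i)) (l : Nat) (hl : l < k) :
    (((arrays.take i).reverse).getD l "" = (arrays.drop i).getD l "") ↔
      (arrays.getD (i - 1 - l) "" = arrays.getD (i + l) "") := by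
  have h1 : ((arrays.take i).reverse).length = i := by simp; omega
  have h2 : (arrays.drop i).length = arrays.length - i := by simp
  rw [List.getD_eq_getElem _ _ (by omega), List.getD_eq_getElem _ _ (by omega),
      List.getD_eq_getElem _ _ (by omega : i - 1 - l < arrays.length),
      List.getD_eq_getElem _ _ (by omega : i + l < arrays.length)]
  rw [List.getElem_reverse, List.getElem_take, List.getElem_drop]
  have e1 : (arrays.take i).length - 1 - l = i - 1 - l := by simp; omega
  simp_rw [e1]

-- the body of B's id-building loop, and its invariant
def csStep (st : PySem.Dict String Int × List Int) (row : String) :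
    PySem.Dict String Int × List Int :=
  let d := if st.1.contains row then st.1 else st.1.insert row (st.1.size : Int)
  (d, st.2 ++ [d.getD row 0])

def IdsInv (d : PySem.Dict String Int) (acc : List Int) (processed : List String) : Prop :=
  acc.length = processed.length ∧
  (∀ x v, d.get? x = some v → 0 ≤ v ∧ v < (d.size : Int)) ∧
  (∀ x y v, d.get? x = some v → d.get? y = some v → x = y) ∧
  (∀ j, j < processed.length →
    ∃ v, d.get? (processed.getD j "") = some v ∧ acc.getD j 0 = v)

theorem getD_append_lt {α : Type} (l : List α) (x d : α) (j : Nat) (h : j < l.length) :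
    (l ++ [x]).getD j d = l.getD j d := by
  rw [List.getD_eq_getElem _ _ (by simp; omega), List.getD_eq_getElem _ _ h,
      List.getElem_append_left]

theorem getD_append_last {α : Type} (l : List α) (x d : α) :
    (l ++ [x]).getD l.length d = x := by
  rw [List.getD_eq_getElem _ _ (by simp)]
  simp

theorem csStep_inv (d : PySem.Dict String Int) (acc : List Int) (processed : List String)
    (row : String) (h : IdsInv d acc processed) :
    IdsInv (csStep (d, acc) row).1 (csStep (d, acc) row).2 (processed ++ [row]) := by
  obtain ⟨h1, h2, h3, h4⟩ := h
  by_cases hc : d.contains row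
  · simp only [csStep, if_pos hc]
    refine ⟨by simp [h1], h2, h3, ?_⟩
    intro j hj
    simp only [List.length_append, List.length_singleton] at hj
    rcases Nat.lt_or_ge j processed.length with hlt | hge
    · obtain ⟨v, hv1, hv2⟩ := h4 j hlt
      exact ⟨v, by rwa [getD_append_lt _ _ _ _ hlt],
        by rw [getD_append_lt _ _ _ _ (by omega : j < acc.length)]; exact hv2⟩
    · have hj' : j = processed.length := by omega
      subst hj'
      have hsome : (d.get? row).isSome := by
        rw [← PySem.Dict.contains_eq_isSome_get?]; exact hc
      obtain ⟨v, hv⟩ := Option.isSome_iff_exists.mp hsome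
      refine ⟨v, by rwa [getD_append_last], ?_⟩
      rw [← h1]
      rw [getD_append_last, PySem.Dict.getD_eq_get?_getD, hv]
      rfl
  · simp only [csStep, if_neg hc]
    have hrow : d.get? row = none :=
      (PySem.Dict.get?_eq_none_iff_contains d row).mpr (by simpa using hc)
    have hsize : (d.insert row (d.size : Int)).size = d.size + 1 := by
      rw [PySem.Dict.size_insert, if_neg hc]
    refine ⟨by simp [h1], ?_, ?_, ?_⟩
    · intro x v hx
      rw [PySem.Dict.get?_insert] at hx
      split_ifs at hx with hxr
      · cases hx; constructor <;> [positivity; simp [hsize]]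
      · have := h2 x v hx
        rw [hsize]
        constructor
        · exact this.1
        · push_cast; omega
    · intro x y v hx hy
      rw [PySem.Dict.get?_insert] at hx hy
      split_ifs at hx hy with hxr hyr hyr
      · rw [hxr, hyr]
      · cases hx
        have := h2 y _ hy
        omega
      · cases hy
        have := h2 x _ hx
        omega
      · exact h3 x y v hx hy
    · intro j hj
      simp only [List.length_append, List.length_singleton] at hj
      rcases Nat.lt_or_ge j processed.length with hlt | hge
      · obtain ⟨v, hv1, hv2⟩ := h4 j hlt
        have hne : processed.getD j "" ≠ row := by
          intro he; rw [he, hrow] at hv1; cases hv1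
        refine ⟨v, ?_, ?_⟩
        · rw [getD_append_lt _ _ _ _ hlt, PySem.Dict.get?_insert_of_ne _ _ hne]
          exact hv1
        · rw [getD_append_lt _ _ _ _ (by omega : j < acc.length)]; exact hv2
      · have hj' : j = processed.length := by omega
        subst hj'
        refine ⟨(d.size : Int), ?_, ?_⟩
        · rw [getD_append_last, PySem.Dict.get?_insert, if_pos rfl]
        · rw [← h1, getD_append_last, PySem.Dict.getD_insert_self]

theorem csFold_inv (rest : List String) :
    ∀ (d : PySem.Dict String Int) (acc : List Int) (processed : List String),
    IdsInv d acc processed →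
    IdsInv (List.foldl csStep (d, acc) rest).1 (List.foldl csStep (d, acc) rest).2
      (processed ++ rest) := by
  induction rest with
  | nil => intro d acc processed h; simpa using h
  | cons row rest ih =>
      intro d acc processed h
      rw [List.foldl_cons]
      have := ih (csStep (d, acc) row).1 (csStep (d, acc) row).2 (processed ++ [row])
        (csStep_inv d acc processed row h)
      simpa using this

theorem csIds_eq_fold (arrays : List String) :
    csIds arrays = List.foldl csStep (PySem.Dict.empty, []) arrays := rfl

theorem csIds_inv (arrays : List String) :
    IdsInv (csIds arrays).1 (csIds arrays).2 arrays := by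
  rw [csIds_eq_fold]
  have h0 : IdsInv PySem.Dict.empty [] [] := by
    refine ⟨rfl, ?_, ?_, ?_⟩
    · intro x v hx; rw [PySem.Dict.get?_empty] at hx; cases hx
    · intro x y v hx; rw [PySem.Dict.get?_empty] at hx; cases hx
    · intro j hj; simp at hj
  simpa using csFold_inv arrays PySem.Dict.empty [] [] h0

theorem csIds_len (arrays : List String) : (csIds arrays).2.length = arrays.length :=
  (csIds_inv arrays).1

-- id sequence entries agree exactly when the rows agree
theorem csIds_inj (arrays : List String) (a b : Nat)
    (ha : a < arrays.length) (hb : b < arrays.length) :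
    ((csIds arrays).2.getD a 0 = (csIds arrays).2.getD b 0 ↔
      arrays.getD a "" = arrays.getD b "") := by
  obtain ⟨h1, h2, h3, h4⟩ := csIds_inv arrays
  obtain ⟨va, hva1, hva2⟩ := h4 a ha
  obtain ⟨vb, hvb1, hvb2⟩ := h4 b hb
  constructor
  · intro h
    rw [hva2, hvb2] at h
    subst h
    exact h3 _ _ _ hva1 hvb1
  · intro h
    rw [hva2, hvb2]
    rw [h, hvb1] at hva1
    exact ((Option.some.injEq _ _).mp hva1).symm

-- ===== mirror-radius theory for B's Manacher loop =====

-- the positions boundary i's mirror of radius k compares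
def Matches (seq : List Int) (i k : Nat) : Prop :=
  ∀ j, j < k → seq.getD (i - 1 - j) 0 = seq.getD (i + j) 0

-- r is THE maximal mirror radius at boundary i
def Good (seq : List Int) (i r : Nat) : Prop :=
  r ≤ min i (seq.length - i) ∧ Matches seq i r ∧
  ¬(r < i ∧ i + r < seq.length ∧ seq.getD (i - 1 - r) 0 = seq.getD (i + r) 0)

def MaxRad (seq : List Int) (i : Nat) : Nat := csExpand seq i 0

theorem sub_sub_one (i k : Nat) : i - k - 1 = i - 1 - k := by omega

theorem expand_good (seq : List Int) (i : Nat) :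
    ∀ (fuel k : Nat), i - k ≤ fuel → k ≤ min i (seq.length - i) → Matches seq i k →
    Good seq i (csExpand seq i k) := by
  intro fuel
  induction fuel with
  | zero =>
      intro k hf hk hm
      rw [csExpand]
      split_ifs with h
      · omega
      · exact ⟨hk, hm, by rw [← sub_sub_one]; exact h⟩
  | succ f ih =>
      intro k hf hk hm
      rw [csExpand]
      split_ifs with h
      · obtain ⟨h1, h2, h3⟩ := h
        refine ih (k + 1) (by omega) (by omega) ?_
        intro j hj
        rcases Nat.lt_or_ge j k with hjk | hjk
        · exact hm j hjk
        · have hj' : j = k := by omega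
          subst hj'
          rw [← sub_sub_one]
          exact h3
      · exact ⟨hk, hm, by rw [← sub_sub_one]; exact h⟩

theorem good_not_lt (seq : List Int) (i r1 r2 : Nat)
    (h1 : Good seq i r1) (h2 : Good seq i r2) : ¬ r1 < r2 := by
  intro hlt
  obtain ⟨hb1, _, hext⟩ := h1
  obtain ⟨hb2, hm2, _⟩ := h2
  exact hext ⟨by omega, by omega, hm2 r1 hlt⟩

theorem good_unique (seq : List Int) (i r1 r2 : Nat)
    (h1 : Good seq i r1) (h2 : Good seq i r2) : r1 = r2 := by
  have := good_not_lt seq i r1 r2 h1 h2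
  have := good_not_lt seq i r2 r1 h2 h1
  omega

theorem maxrad_good (seq : List Int) (i : Nat) : Good seq i (MaxRad seq i) :=
  expand_good seq i i 0 (by omega) (by omega) (fun j hj => by omega)

theorem expand_eq_maxrad (seq : List Int) (i k : Nat)
    (hk : k ≤ min i (seq.length - i)) (hm : Matches seq i k) :
    csExpand seq i k = MaxRad seq i :=
  good_unique seq i _ _ (expand_good seq i i k (by omega) hk hm) (maxrad_good seq i)

theorem maxrad_le (seq : List Int) (i : Nat) : MaxRad seq i ≤ min i (seq.length - i) :=
  (maxrad_good seq i).1

theorem maxrad_matches (seq : List Int) (i : Nat) : Matches seq i (MaxRad seq i) :=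
  (maxrad_good seq i).2.1

theorem maxrad_zero (seq : List Int) : MaxRad seq 0 = 0 := by
  unfold MaxRad
  rw [csExpand]
  split_ifs with h
  · omega
  · rfl

-- a full mirror at boundary i ⇔ the maximal radius reaches an edge
theorem full_iff (seq : List Int) (i : Nat) (_hi : 1 ≤ i) (hn : i < seq.length) :
    Matches seq i (min i (seq.length - i)) ↔ min i (seq.length - i) ≤ MaxRad seq i := by
  constructor
  · intro hm
    have hg : Good seq i (min i (seq.length - i)) := ⟨le_rfl, hm, by omega⟩
    rw [good_unique seq i _ _ hg (maxrad_good seq i)]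
  · intro hle
    have := maxrad_le seq i
    have he : min i (seq.length - i) = MaxRad seq i := by omega
    rw [he]
    exact maxrad_matches seq i

-- Manacher's mirror trick: the truncated mirrored radius is a valid start
theorem mirror_valid (seq : List Int) (c i : Nat) (hc : c < i)
    (hir : i < c + MaxRad seq c) :
    min (MaxRad seq (2 * c - i)) (c + MaxRad seq c - i) ≤ min i (seq.length - i) ∧
    Matches seq i (min (MaxRad seq (2 * c - i)) (c + MaxRad seq c - i)) := by
  have hRc := maxrad_le seq c
  have HMc := maxrad_matches seq c
  have hm2c : i < 2 * c := by omega
  have hRm := maxrad_le seq (2 * c - i)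
  have HMm := maxrad_matches seq (2 * c - i)
  constructor
  · omega
  · intro j hj
    -- step 1: seq[i+j] = seq[(2c-i)-1-j]  via the palindrome at c
    have s1 : seq.getD (c - 1 - (i + j - c)) 0 = seq.getD (c + (i + j - c)) 0 :=
      HMc (i + j - c) (by omega)
    have e1a : c + (i + j - c) = i + j := by omega
    have e1b : c - 1 - (i + j - c) = 2 * c - i - 1 - j := by omega
    rw [e1a, e1b] at s1
    -- step 2: seq[(2c-i)-1-j] = seq[(2c-i)+j]  via the palindrome at 2c-i
    have s2 : seq.getD (2 * c - i - 1 - j) 0 = seq.getD (2 * c - i + j) 0 :=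
      HMm j (by omega)
    -- step 3: seq[i-1-j] = seq[(2c-i)+j]  via the palindrome at c (two cases)
    have s3 : seq.getD (i - 1 - j) 0 = seq.getD (2 * c - i + j) 0 := by
      rcases Nat.lt_or_ge (i - 1 - j) c with hlt | hge
      · have s := HMc (c - 1 - (i - 1 - j)) (by omega)
        have e3a : c - 1 - (c - 1 - (i - 1 - j)) = i - 1 - j := by omega
        have e3b : c + (c - 1 - (i - 1 - j)) = 2 * c - i + j := by omega
        rw [e3a, e3b] at s
        exact s
      · have s := HMc (i - 1 - j - c) (by omega)
        have e3a : c + (i - 1 - j - c) = i - 1 - j := by omega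
        have e3b : c - 1 - (i - 1 - j - c) = 2 * c - i + j := by omega
        rw [e3a, e3b] at s
        exact s.symm
    rw [s3, ← s2, s1]

-- invariant of B's main loop
def MInv (seq : List Int) (i : Nat) (rad : List Nat) (c r : Nat) : Prop :=
  rad.length = i ∧ (∀ j, j < i → rad.getD j 0 = MaxRad seq j) ∧
  c < i ∧ r = c + MaxRad seq c

theorem manacher_getD (seq : List Int) :
    ∀ (fuel i : Nat) (rad : List Nat) (c r : Nat), seq.length - i ≤ fuel →
    MInv seq i rad c r →
    ∀ j, j < seq.length → (csManacher seq i rad c r).getD j 0 = MaxRad seq j := by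
  intro fuel
  induction fuel with
  | zero =>
      intro i rad c r hf hinv j hj
      rw [csManacher, dif_neg (by omega)]
      exact hinv.2.1 j (by omega)
  | succ f ih =>
      intro i rad c r hf hinv j hj
      obtain ⟨hlen, hrad, hci, hr⟩ := hinv
      by_cases hin : i < seq.length
      · rw [csManacher, dif_pos hin]
        have hRc := maxrad_le seq c
        have hkmax :
            csExpand seq i (if i < r then min (rad.getD (2 * c - i) 0) (r - i) else 0)
              = MaxRad seq i := by
          split_ifs with hirt
          · have hmlt : 2 * c - i < i := by omega
            rw [hrad (2 * c - i) hmlt, hr]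
            have hv := mirror_valid seq c i hci (by omega)
            exact expand_eq_maxrad seq i _ hv.1 hv.2
          · exact expand_eq_maxrad seq i 0 (by omega) (fun l hl => by omega)
        simp only [hkmax]
        have hinv' : ∀ (c' r' : Nat), c' < i + 1 → r' = c' + MaxRad seq c' →
            MInv seq (i + 1) (rad ++ [MaxRad seq i]) c' r' := by
          intro c' r' hc' hr'
          refine ⟨by simp [hlen], ?_, hc', hr'⟩
          intro l hl
          rcases Nat.lt_or_ge l i with hl' | hl'
          · rw [getD_append_lt rad (MaxRad seq i) 0 l (by omega)]
            exact hrad l hl'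
          · have : l = i := by omega
            subst this
            rw [← hlen, getD_append_last]
        split_ifs with hbr
        · exact ih (i + 1) _ i (i + MaxRad seq i) (by omega)
            (hinv' i (i + MaxRad seq i) (by omega) rfl) j hj
        · exact ih (i + 1) _ c r (by omega)
            (hinv' c r (by omega) hr) j hj
      · rw [csManacher, dif_neg hin]
        exact hrad j (by omega)

-- the two scans agree at every start index i ≥ 1
theorem loops_eq (arrays : List String) (radF : List Nat)
    (hradF : ∀ j, j < arrays.length → radF.getD j 0 = MaxRad (csIds arrays).2 j) :
    ∀ (fuel i : Nat), arrays.length - i ≤ fuel → 1 ≤ i →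
    csOuterA arrays i = csScan radF arrays.length i := by
  intro fuel
  induction fuel with
  | zero =>
      intro i hf hi
      rw [csOuterA, csScan, dif_neg (by omega), dif_neg (by omega)]
  | succ f ih =>
      intro i hf hi
      by_cases hin : i < arrays.length
      · have hlen : (csIds arrays).2.length = arrays.length := csIds_len arrays
        have hfl : ((arrays.take i).reverse).length = i := by simp; omega
        have hsl : (arrays.drop i).length = arrays.length - i := by simp
        have hm : min ((arrays.take i).reverse).length (arrays.drop i).length
            = min i (arrays.length - i) := by rw [hfl, hsl]
        have hm1 : 0 < min i (arrays.length - i) := by omega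
        rw [csOuterA, dif_pos hin, csScan, dif_pos hin]
        simp only
        rw [csInnerA_eq _ _ (min ((arrays.take i).reverse).length (arrays.drop i).length) 0
          (by omega) (by rw [hm]; omega)]
        have hcond : (∀ l, 0 ≤ l → l < min ((arrays.take i).reverse).length (arrays.drop i).length →
              ((arrays.take i).reverse).getD l "" = (arrays.drop i).getD l "") ↔
            min i (arrays.length - i) ≤ radF.getD i 0 := by
          rw [hradF i hin]
          have hfull := full_iff (csIds arrays).2 i hi (by rw [hlen]; omega)
          rw [hlen] at hfull
          rw [← hfull]
          constructor
          · intro h j hj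
            rw [csIds_inj arrays _ _ (by omega) (by omega)]
            rw [← mirror_cond arrays i hi hin _ rfl j hj]
            exact h j (by omega) (by omega)
          · intro h l _ hl
            rw [hm] at hl
            rw [mirror_cond arrays i hi hin _ rfl l hl]
            rw [← csIds_inj arrays _ _ (by omega) (by omega)]
            exact h l hl
        by_cases hA : ∀ l, 0 ≤ l → l < min ((arrays.take i).reverse).length (arrays.drop i).length →
            ((arrays.take i).reverse).getD l "" = (arrays.drop i).getD l ""
        · rw [if_pos hA, if_pos (hcond.mp hA)]
          simp [hfl]
        · rw [if_neg hA, if_neg (fun hB => hA (hcond.mpr hB))]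
          exact ih (i + 1) (by omega) (by omega)
      · rw [csOuterA, csScan, dif_neg hin, dif_neg hin]

-- ===== VERDICT (by name: the statement is the Claim_ definition above) =====
theorem check_symmetry_spec : Claim_equal_check_symmetry := by
  intro arrays _
  unfold Spec_check_symmetry check_symmetry check_symmetry_alt
  simp only
  rw [csIds_len]
  refine loops_eq arrays _ ?_ arrays.length 1 (by omega) le_rfl
  intro j hj
  have h0 : MInv (csIds arrays).2 1 [0] 0 0 := by
    refine ⟨rfl, ?_, by omega, by rw [maxrad_zero]⟩
    intro l hl
    have : l = 0 := by omega
    subst this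
    rw [maxrad_zero]
    rfl
  exact manacher_getD (csIds arrays).2 ((csIds arrays).2.length) 1 [0] 0 0 (by omega) h0 j
    (by rw [csIds_len]; omega)
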